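-- pv_equiv track=rewrite | github.com/itrummer/dbz | libraries/row_lists.py | group_by_sum
-- ===== SOURCE A (Python) =====
-- def group_by_sum(table, agg_column, group_columns):
--     """ Calculate sum for each value combination in group columns.
--
--     Args:
--         table: a list of rows where each row is a list.
--         agg_column: index of column for which to calculate sum.
--         group_columns: indexes of columns to group by.
--
--     Returns:
--         group columns and associated sum: a list of rows where each row is a list.
--     """
--     # create a dictionary with group columns as keys and sum as values
--     group_dict = {}
--     for row in table:
--         # create a tuple of group columns
--         group_tuple = tuple([row[i] for i in group_columns])
--         # if group_tuple is not in group_dict, add it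
--         if group_tuple not in group_dict:
--             group_dict[group_tuple] = 0
--         # add agg_column value to group_dict
--         group_dict[group_tuple] += row[agg_column]
--     # create a list of lists from group_dict
--     result = []
--     for key in group_dict:
--         result.append(list(key) + [group_dict[key]])
--     return result
-- ===== SOURCE B (Python) =====
-- def group_by_sum(table, agg_column, group_columns):
--     """Two staged passes, no dictionary: collect the distinct group keys in
--     order of first appearance, then for each key scan the table and sum the
--     aggregate column over its matching rows."""
--     keys = []
--     for row in table:
--         key = [row[i] for i in group_columns]
--         if key not in keys:
--             keys.append(key)
--     return [key + [sum(row[agg_column] for row in table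
--                        if [row[i] for i in group_columns] == key)]
--             for key in keys]
-- ===== Notes on version B (the rewrite author's own statement) =====
-- stated objective: alternative
-- what changed: B drops the dictionary entirely: a first pass collects the distinct group keys in first-appearance order into a plain list, then a per-key rescan of the table sums the aggregate column, trading A's hash accumulation for staged list scans.
import Mathlib
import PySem

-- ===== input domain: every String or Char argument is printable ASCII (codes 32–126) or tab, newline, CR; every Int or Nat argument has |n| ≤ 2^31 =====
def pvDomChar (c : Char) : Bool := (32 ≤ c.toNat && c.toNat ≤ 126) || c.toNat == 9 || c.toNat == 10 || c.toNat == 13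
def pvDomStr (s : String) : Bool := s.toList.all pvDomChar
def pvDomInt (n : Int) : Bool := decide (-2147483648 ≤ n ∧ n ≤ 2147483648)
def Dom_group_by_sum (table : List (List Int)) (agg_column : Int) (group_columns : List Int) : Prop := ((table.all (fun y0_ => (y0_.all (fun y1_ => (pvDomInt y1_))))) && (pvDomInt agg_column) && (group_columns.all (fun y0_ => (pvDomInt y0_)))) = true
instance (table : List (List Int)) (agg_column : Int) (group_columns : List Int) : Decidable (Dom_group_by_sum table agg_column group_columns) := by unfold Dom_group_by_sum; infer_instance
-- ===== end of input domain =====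

-- B replaces A's dictionary accumulation entirely by two staged list scans:
-- collect distinct group keys in first-appearance order, then rescan the table per key
-- to sum the aggregate column (objective: alternative algorithm, no dict at all).

-- ===== PORT A =====
-- one iteration of A's accumulation loop over the table
def pvStepA (agg_column : Int) (group_columns : List Int)
    (group_dict : PySem.Dict (List Int) Int) (row : List Int) : PySem.Dict (List Int) Int :=
  let group_tuple := group_columns.map (fun i => PySem.List.pyGetD row i 0)
  let group_dict := if group_dict.contains group_tuple then group_dict
                    else group_dict.insert group_tuple 0
  group_dict.modify group_tuple 0 (· + PySem.List.pyGetD row agg_column 0)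

def group_by_sum (table : List (List Int)) (agg_column : Int) (group_columns : List Int) : List (List Int) :=
  let group_dict := table.foldl (pvStepA agg_column group_columns) PySem.Dict.empty
  group_dict.keys.foldl (fun result key => result ++ [key ++ [group_dict.getD key 0]]) []

-- ===== PORT B =====
-- `[row[i] for i in group_columns]`
def pvKeyOf (group_columns : List Int) (row : List Int) : List Int :=
  group_columns.map (fun i => PySem.List.pyGetD row i 0)

-- B's first pass: distinct keys in first-appearance order (`if key not in keys: keys.append(key)`)
def pvKeys (group_columns : List Int) (table : List (List Int)) : List (List Int) :=
  table.foldl (fun ks row =>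
    let key := pvKeyOf group_columns row
    if key ∈ ks then ks else ks ++ [key]) []

-- B's per-key rescan: `sum(row[agg_column] for row in table if [row[i] for i in group_columns] == key)`
def pvAggSum (table : List (List Int)) (agg_column : Int) (group_columns : List Int)
    (key : List Int) : Int :=
  ((table.filter (fun row => pvKeyOf group_columns row == key)).map
     (fun row => PySem.List.pyGetD row agg_column 0)).sum

def group_by_sum_alt (table : List (List Int)) (agg_column : Int) (group_columns : List Int) : List (List Int) :=
  (pvKeys group_columns table).map
    (fun key => key ++ [pvAggSum table agg_column group_columns key])

-- ===== PRECONDITION & SPEC =====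
-- Pre_ excludes exactly the inputs on which Python A raises IndexError:
-- some row is indexed out of range by agg_column or by a group column.
def Pre_group_by_sum (table : List (List Int)) (agg_column : Int) (group_columns : List Int) : Prop :=
  ∀ row ∈ table, PySem.Raise.InRange row.length agg_column ∧
    ∀ i ∈ group_columns, PySem.Raise.InRange row.length i
instance (table : List (List Int)) (agg_column : Int) (group_columns : List Int) : Decidable (Pre_group_by_sum table agg_column group_columns) := by unfold Pre_group_by_sum; infer_instance

def pvWitness_group_by_sum : List (List Int) × Int × List Int := ([[1, 2], [1, 3], [0, 4]], 1, [0])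

def Spec_group_by_sum (table : List (List Int)) (agg_column : Int) (group_columns : List Int) (out : List (List Int)) : Prop := out = group_by_sum_alt table agg_column group_columns
instance (table : List (List Int)) (agg_column : Int) (group_columns : List Int) (out : List (List Int)) : Decidable (Spec_group_by_sum table agg_column group_columns out) := by unfold Spec_group_by_sum; infer_instance

-- ===== CLAIM (what is proved, stated in full; the proofs are below) =====
def Claim_equal_group_by_sum : Prop := ∀ (table : List (List Int)) (agg_column : Int) (group_columns : List Int), Dom_group_by_sum table agg_column group_columns → Pre_group_by_sum table agg_column group_columns → Spec_group_by_sum table agg_column group_columns (group_by_sum table agg_column group_columns)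

-- ===== LEMMAS AND PROOFS =====

-- A's loop body is "insert key (current sum + row's aggregate value)"
theorem pv_stepA_eq (agg_column : Int) (group_columns : List Int)
    (d : PySem.Dict (List Int) Int) (row : List Int) :
    pvStepA agg_column group_columns d row
      = d.insert (pvKeyOf group_columns row)
          (d.getD (pvKeyOf group_columns row) 0 + PySem.List.pyGetD row agg_column 0) := by
  unfold pvStepA pvKeyOf
  set key := group_columns.map (fun i => PySem.List.pyGetD row i 0)
  by_cases hc : d.contains key = true
  · simp only [hc, if_true, PySem.Dict.modify]
  · have h0 : d.getD key 0 = 0 := PySem.Dict.getD_of_not_contains d 0 (by simpa using hc)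
    simp only [hc, if_false, Bool.false_eq_true, PySem.Dict.modify,
      PySem.Dict.getD_insert_self, PySem.Dict.insert_insert_self, h0]

theorem pv_aggSum_cons (agg_column : Int) (group_columns : List Int)
    (row : List Int) (rest : List (List Int)) (k : List Int) :
    pvAggSum (row :: rest) agg_column group_columns k
      = (if pvKeyOf group_columns row = k then PySem.List.pyGetD row agg_column 0 else 0)
        + pvAggSum rest agg_column group_columns k := by
  unfold pvAggSum
  by_cases h : pvKeyOf group_columns row = k
  · simp [List.filter_cons, h]
  · simp [List.filter_cons, h]

-- characterisation of A's accumulation fold: keys follow B's dedup fold,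
-- values are the partial aggregate sums
theorem pv_foldA_char (agg_column : Int) (group_columns : List Int) :
    ∀ (rows : List (List Int)) (d : PySem.Dict (List Int) Int), d.keys.Nodup →
      (rows.foldl (pvStepA agg_column group_columns) d).keys.Nodup ∧
      (rows.foldl (pvStepA agg_column group_columns) d).keys
        = rows.foldl (fun ks row =>
            let key := pvKeyOf group_columns row
            if key ∈ ks then ks else ks ++ [key]) d.keys ∧
      ∀ k, (rows.foldl (pvStepA agg_column group_columns) d).get? k
        = match d.get? k with
          | some v => some (v + pvAggSum rows agg_column group_columns k)
          | none => if k ∈ rows.map (pvKeyOf group_columns)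
                    then some (pvAggSum rows agg_column group_columns k) else none := by
  intro rows
  induction rows with
  | nil =>
    intro d hnd
    refine ⟨hnd, rfl, ?_⟩
    intro k
    cases h : d.get? k <;> simp [pvAggSum, h]
  | cons row rest ih =>
    intro d hnd
    set key := pvKeyOf group_columns row with hkeydef
    set v := PySem.List.pyGetD row agg_column 0 with hvdef
    have hstep : pvStepA agg_column group_columns d row
        = d.insert key (d.getD key 0 + v) := pv_stepA_eq agg_column group_columns d row
    have hnd' : (d.insert key (d.getD key 0 + v)).keys.Nodup :=
      PySem.Dict.nodup_keys_insert d _ _ hnd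
    obtain ⟨ihnd, ihkeys, ihget⟩ := ih (d.insert key (d.getD key 0 + v)) hnd'
    have hkeys_step : (d.insert key (d.getD key 0 + v)).keys
        = if key ∈ d.keys then d.keys else d.keys ++ [key] := by
      by_cases hm : key ∈ d.keys
      · rw [if_pos hm, PySem.Dict.keys_insert_of_contains d _
          ((PySem.Dict.contains_iff_mem_keys d key).mpr hm)]
      · rw [if_neg hm, PySem.Dict.keys_insert_of_not_contains d _
          (by simpa using fun hc => hm ((PySem.Dict.contains_iff_mem_keys d key).mp hc))]
    refine ⟨?_, ?_, ?_⟩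
    · simpa [List.foldl_cons, hstep] using ihnd
    · simp only [List.foldl_cons, hstep, ihkeys, hkeys_step, ← hkeydef]
    · intro k
      simp only [List.foldl_cons, hstep]
      rw [ihget k]
      rw [PySem.Dict.get?_insert]
      rw [pv_aggSum_cons]
      by_cases hk : k = key
      · rw [hk]
        simp only [if_pos rfl, ← hkeydef]
        cases hd : d.get? key with
        | some w =>
          have hw : d.getD key 0 = w := PySem.Dict.getD_of_get?_eq_some d 0 hd
          simp [hd, hw, add_assoc, ← hvdef]
        | none =>
          have hw : d.getD key 0 = 0 := PySem.Dict.getD_of_get?_eq_none d 0 hd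
          simp [hd, hw, List.map_cons, ← hvdef]
          intro h
          exact absurd hkeydef h
      · have hk2 : pvKeyOf group_columns row ≠ k := fun he => hk (he ▸ rfl)
        rw [if_neg hk, if_neg hk2]
        cases hd : d.get? k with
        | some w => simp [hd]
        | none =>
          simp only [hd, List.map_cons, List.mem_cons, zero_add]
          have : (k ∈ rest.map (pvKeyOf group_columns)) ↔
              (k = pvKeyOf group_columns row ∨ k ∈ rest.map (pvKeyOf group_columns)) := by
            constructor
            · exact Or.inr
            · rintro (h | h)
              · exact absurd h.symm hk2
              · exact h
          rw [if_congr this.symm rfl rfl]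
  termination_by rows => rows.length

-- any key produced by the dedup fold comes from the initial list or from a row's key
theorem pv_mem_dedup (group_columns : List Int) :
    ∀ (rows : List (List Int)) (init : List (List Int)) (x : List Int),
      x ∈ rows.foldl (fun ks row =>
            let key := pvKeyOf group_columns row
            if key ∈ ks then ks else ks ++ [key]) init →
      x ∈ init ∨ x ∈ rows.map (pvKeyOf group_columns) := by
  intro rows
  induction rows with
  | nil => intro init x h; exact Or.inl h
  | cons row rest ih =>
    intro init x h
    simp only [List.foldl_cons] at h
    rcases ih _ x h with h2 | h2
    · by_cases hm : pvKeyOf group_columns row ∈ init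
      · rw [if_pos hm] at h2; exact Or.inl h2
      · rw [if_neg hm] at h2
        rcases List.mem_append.mp h2 with h3 | h3
        · exact Or.inl h3
        · exact Or.inr (by simp [List.mem_singleton.mp h3])
    · exact Or.inr (by simp [h2])

-- ===== VERDICT (by name: the statement is the Claim_ definition above) =====
theorem group_by_sum_spec : Claim_equal_group_by_sum := by
  intro table agg_column group_columns _ _
  unfold Spec_group_by_sum group_by_sum group_by_sum_alt
  obtain ⟨hnd, hkeys, hget⟩ :=
    pv_foldA_char agg_column group_columns table PySem.Dict.empty PySem.Dict.nodup_keys_empty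
  set gd := table.foldl (pvStepA agg_column group_columns) PySem.Dict.empty with hgd
  rw [PySem.List.foldl_append_singleton_eq_map (fun key => key ++ [gd.getD key 0]) gd.keys []]
  have hkeys2 : gd.keys = pvKeys group_columns table := by
    rw [hkeys]; simp [pvKeys, PySem.Dict.keys_empty]
  rw [List.nil_append, hkeys2]
  apply List.map_congr_left
  intro k hk
  have hmem : k ∈ table.map (pvKeyOf group_columns) := by
    rcases pv_mem_dedup group_columns table [] k (by simpa [pvKeys] using hk) with h | h
    · exact absurd h (List.not_mem_nil)
    · exact h
  have hg := hget k
  rw [PySem.Dict.get?_empty, if_pos hmem] at hg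
  rw [PySem.Dict.getD_of_get?_eq_some gd 0 hg]
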